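-- pv_equiv track=rewrite | github.com/nuria/study | EPI/monotonic.py | monotonic_i
-- ===== SOURCE A (Python) =====
-- def monotonic_i(A):
--     # creates a monotonic starting stack from a list
--     m = []
--     m.append(A[0])
--
--     for a in A[1:]:
--         #admits equal elements
--         while( len(m) > 0 and a < m[-1]):
--             m.pop()
--
--         m.append(a)
--
--     return m
-- ===== SOURCE B (Python) =====
-- def monotonic_i(A):
--     # right-to-left non-strict running-minimum pass: an element survives A's
--     # stack iff it is <= every later element; no stack, no popping.
--     rev = A[::-1]
--     m = rev[0]          # raises IndexError on empty input, like A[0]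
--     res = [m]
--     for a in rev[1:]:
--         if a <= m:
--             res.append(a)
--             m = a
--     return res[::-1]
-- ===== Notes on version B (the rewrite author's own statement) =====
-- stated objective: alternative
-- what changed: Replaces the pop-while monotonic stack with a single right-to-left running-minimum scan (an element survives iff it is <= every later element), collecting survivors in reverse and reversing once.
-- outside the precondition, e.g. on monotonic_i([]): A raises IndexError, B raises IndexError
import Mathlib
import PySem

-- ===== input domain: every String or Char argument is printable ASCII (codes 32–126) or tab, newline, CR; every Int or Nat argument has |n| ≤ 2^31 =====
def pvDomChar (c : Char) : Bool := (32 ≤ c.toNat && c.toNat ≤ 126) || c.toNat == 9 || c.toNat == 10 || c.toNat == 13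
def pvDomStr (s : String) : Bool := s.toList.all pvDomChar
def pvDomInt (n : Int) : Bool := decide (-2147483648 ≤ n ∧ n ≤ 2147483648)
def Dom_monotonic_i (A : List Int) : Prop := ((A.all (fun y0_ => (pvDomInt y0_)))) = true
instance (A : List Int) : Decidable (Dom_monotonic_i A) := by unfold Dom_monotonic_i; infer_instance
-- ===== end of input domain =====

-- B replaces A's pop-while monotonic stack with a single right-to-left
-- running-minimum scan; equivalence proved on all non-empty lists (A raises
-- IndexError on [], which Pre_ excludes).


-- ===== PORT A =====
-- the while loop: pop from the end while the stack is nonempty and a < its last element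
def popLoop (a : Int) (m : List Int) : List Int :=
  if h : m ≠ [] ∧ a < m.getLast! then popLoop a m.dropLast else m
termination_by m.length
decreasing_by
  cases m with
  | nil => exact absurd rfl h.1
  | cons x xs => simp [List.length_dropLast]

def monotonic_i (A : List Int) : List Int :=
  match A with
  | [] => []          -- A[0] raises IndexError here; excluded by Pre_monotonic_i
  | a0 :: rest =>     -- m = [A[0]]; for a in A[1:]: while …: pop; append a
      rest.foldl (fun m a => popLoop a m ++ [a]) [a0]

-- ===== PORT B =====
def monotonic_i_alt (A : List Int) : List Int :=
  match A.reverse with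
  | [] => []          -- rev[0] raises IndexError here; excluded by Pre_monotonic_i
  | m0 :: rest =>
      (rest.foldl (fun (p : List Int × Int) a =>
          if a ≤ p.2 then (p.1 ++ [a], a) else p) ([m0], m0)).1.reverse

-- ===== PRECONDITION & SPEC =====
-- A evaluates A[0] first and raises IndexError on the empty list (B likewise): excluded.
def Pre_monotonic_i (A : List Int) : Prop := A ≠ []
instance (A : List Int) : Decidable (Pre_monotonic_i A) := by unfold Pre_monotonic_i; infer_instance
def pvWitness_monotonic_i : List Int := ([3, 1, 4, 1, 5])

def Spec_monotonic_i (A : List Int) (out : List Int) : Prop := out = monotonic_i_alt A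
instance (A : List Int) (out : List Int) : Decidable (Spec_monotonic_i A out) := by unfold Spec_monotonic_i; infer_instance

-- ===== CLAIM (what is proved, stated in full; the proofs are below) =====
def Claim_equal_monotonic_i : Prop := ∀ (A : List Int), Dom_monotonic_i A → Pre_monotonic_i A → Spec_monotonic_i A (monotonic_i A)

-- ===== LEMMAS AND PROOFS =====

-- the common specification: an element survives iff it is ≤ every later element
def keep : List Int → List Int
  | [] => []
  | x :: xs => if xs.all (fun y => x ≤ y) then x :: keep xs else keep xs

lemma keep_mem : ∀ (L : List Int) (x : Int), x ∈ keep L → x ∈ L := by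
  intro L
  induction L with
  | nil => simp [keep]
  | cons a L ih =>
      intro x hx
      simp only [keep] at hx
      split at hx
      · rcases List.mem_cons.mp hx with h | h
        · simp [h]
        · exact List.mem_cons_of_mem _ (ih x h)
      · exact List.mem_cons_of_mem _ (ih x hx)

lemma keep_sorted : ∀ (L : List Int), (keep L).Pairwise (· ≤ ·) := by
  intro L
  induction L with
  | nil => simp [keep]
  | cons a L ih =>
      simp only [keep]
      split
      · rename_i hall
        refine List.pairwise_cons.mpr ⟨?_, ih⟩
        intro y hy
        simpa using (List.all_eq_true.mp hall y (keep_mem L y hy))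
      · exact ih

lemma getLast!_concat_int (x : Int) : ∀ (m : List Int), (m ++ [x]).getLast! = x := by
  intro m
  induction m with
  | nil => rfl
  | cons a m ih =>
      cases m with
      | nil => rfl
      | cons b m' => simpa [List.getLast!] using (by simpa [List.getLast!] using ih)

lemma popLoop_concat (a x : Int) (m : List Int) :
    popLoop a (m ++ [x]) = if a < x then popLoop a m else m ++ [x] := by
  rw [popLoop]
  simp [getLast!_concat_int, List.dropLast_concat]

lemma popLoop_nil (a : Int) : popLoop a [] = [] := by
  rw [popLoop]; simp

-- on a nondecreasing stack, the pop loop is exactly a filter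
lemma popLoop_eq_filter (a : Int) :
    ∀ (m : List Int), m.Pairwise (· ≤ ·) →
      popLoop a m = m.filter (fun y => y ≤ a) := by
  intro m
  induction m using List.reverseRecOn with
  | nil => intro _; simp [popLoop_nil]
  | append_singleton m x ih =>
      intro hsort
      have hsort' : m.Pairwise (· ≤ ·) := (List.pairwise_append.mp hsort).1
      have hle : ∀ y ∈ m, y ≤ x := by
        intro y hy
        exact (List.pairwise_append.mp hsort).2.2 y hy x (by simp)
      rw [popLoop_concat]
      by_cases hax : a < x
      · have : ¬ (x ≤ a) := by omega
        simp [hax, List.filter_append, this, ih hsort']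
      · have hxa : x ≤ a := by omega
        have : ∀ y ∈ m, y ≤ a := fun y hy => le_trans (hle y hy) hxa
        simp [hax, List.filter_append, hxa]
        exact (List.filter_eq_self.mpr (by intro y hy; simpa using this y hy)).symm

lemma keep_concat (a : Int) :
    ∀ (L : List Int), keep (L ++ [a]) = (keep L).filter (fun y => y ≤ a) ++ [a] := by
  intro L
  induction L with
  | nil => simp [keep]
  | cons x L ih =>
      simp only [List.cons_append, keep, List.all_append, List.all_cons, List.all_nil]
      by_cases hL : L.all (fun y => x ≤ y)
      · by_cases hxa : x ≤ a
        · simp [hL, hxa, ih, keep, List.filter_cons]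
        · simp [hL, hxa, ih, keep, List.filter_cons]
      · simp [hL, ih, keep]

-- A equals keep on nonempty lists
lemma A_eq_keep : ∀ (L : List Int), L ≠ [] → monotonic_i L = keep L := by
  intro L
  induction L using List.reverseRecOn with
  | nil => intro h; exact absurd rfl h
  | append_singleton L a ih =>
      intro _
      cases L with
      | nil => simp [monotonic_i, keep]
      | cons b L' =>
          have hstep : monotonic_i ((b :: L') ++ [a])
              = popLoop a (monotonic_i (b :: L')) ++ [a] := by
            simp [monotonic_i, List.foldl_append]
          rw [hstep, ih (by simp), popLoop_eq_filter a _ (keep_sorted _), keep_concat]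

-- B's loop invariant: m is a member of the processed suffix s and a lower bound of it,
-- and the accumulated list is (keep s).reverse
lemma B_inv : ∀ (rs : List Int) (s : List Int) (m : Int),
    m ∈ s → (∀ y ∈ s, m ≤ y) →
    (rs.foldl (fun (p : List Int × Int) a =>
        if a ≤ p.2 then (p.1 ++ [a], a) else p) ((keep s).reverse, m)).1
      = (keep (rs.reverse ++ s)).reverse := by
  intro rs
  induction rs with
  | nil => intro s m _ _; simp
  | cons a rs ih =>
      intro s m hmem hlb
      simp only [List.foldl_cons]
      by_cases ha : a ≤ m
      · have hall : ∀ y ∈ s, a ≤ y := fun y hy => le_trans ha (hlb y hy)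
        have hkeep : keep (a :: s) = a :: keep s := by
          simp only [keep]
          rw [if_pos (List.all_eq_true.mpr (by intro y hy; simpa using hall y hy))]
        have : (keep s).reverse ++ [a] = (keep (a :: s)).reverse := by
          simp [hkeep]
        simp only [ha, if_pos, this]
        rw [ih (a :: s) a (by simp) (by intro y hy; rcases List.mem_cons.mp hy with h | h
                                        · omega
                                        · exact le_trans ha (hlb y h))]
        simp
      · have hma : m < a := by omega
        have hkeep : keep (a :: s) = keep s := by
          simp only [keep]
          rw [if_neg]
          intro hall
          exact absurd (List.all_eq_true.mp hall m hmem) (by simpa using ha)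
        simp only [ha, if_neg, ite_false]
        rw [← hkeep] at *
        rw [ih (a :: s) m (List.mem_cons_of_mem _ hmem)
              (by intro y hy; rcases List.mem_cons.mp hy with h | h
                  · omega
                  · exact hlb y h)]
        simp

lemma B_eq_keep : ∀ (L : List Int), L ≠ [] → monotonic_i_alt L = keep L := by
  intro L hL
  have hrev : L.reverse ≠ [] := by simpa using hL
  obtain ⟨m0, rest, hr⟩ := List.exists_cons_of_ne_nil hrev
  have hL' : L = rest.reverse ++ [m0] := by
    have := congrArg List.reverse hr
    simpa using this
  simp only [monotonic_i_alt, hr]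
  have hk0 : keep [m0] = [m0] := by simp [keep]
  have := B_inv rest [m0] m0 (by simp) (by simp)
  rw [hk0] at this
  simp only [List.reverse_singleton] at this
  rw [this, ← hL']
  simp

-- ===== VERDICT (by name: the statement is the Claim_ definition above) =====
theorem monotonic_i_spec : Claim_equal_monotonic_i := by
  intro A _ hpre
  unfold Spec_monotonic_i
  rw [A_eq_keep A hpre, B_eq_keep A hpre]
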